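-- pv_equiv track=rewrite | github.com/alancast/LeetCodeProblems | python/medium/3066_minOperationsExceedThreshold.py | minOperationsPQ
-- ===== SOURCE A (Python) =====
-- import heapq
-- from typing import List
--
-- def minOperationsPQ(nums: List[int], k: int) -> int:
--     heapq.heapify(nums)
--     numOperations = 0
--     while nums[0] < k:
--         num1 = heapq.heappop(nums)
--         num2 = heapq.heappop(nums)
--         newNum = (min(num1, num2) * 2) + max(num1, num2)
--         heapq.heappush(nums, newNum)
--         numOperations += 1
--
--     return numOperations
-- ===== SOURCE B (Python) =====
-- from typing import List
--
-- def _front(arr, i, q, j):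
--     # peek the smallest of the two sorted queues (IndexError when both are empty,
--     # exactly where A's nums[0] raises)
--     if i < len(arr) and (j >= len(q) or arr[i] <= q[j]):
--         return arr[i]
--     return q[j]
--
-- def _take(arr, i, q, j):
--     # pop the smallest of the two sorted queues, returning it with the new cursors
--     if i < len(arr) and (j >= len(q) or arr[i] <= q[j]):
--         return arr[i], i + 1, j
--     return q[j], i, j + 1
--
-- def minOperationsPQ(nums: List[int], k: int) -> int:
--     # Two-queue (Huffman-style) merge instead of a heap: sort once, keep the sorted
--     # originals behind cursor i and the combined values (which are produced in
--     # non-decreasing order) behind cursor j; every pop is O(1).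
--     # Does not mutate the caller's list (A heapifies nums in place).
--     arr = sorted(nums)
--     q = []
--     i = j = 0
--     ops = 0
--     while _front(arr, i, q, j) < k:
--         a, i, j = _take(arr, i, q, j)
--         b, i, j = _take(arr, i, q, j)
--         q.append(2 * a + b)
--         ops += 1
--     return ops
-- ===== Notes on version B (the rewrite author's own statement) =====
-- stated objective: alternative
-- what changed: Replaces the binary heap with a two-queue (Huffman-style) merge: B sorts nums once, then pops the two globally smallest elements in O(1) by comparing the fronts of the sorted originals and of the queue of combined values (which is produced in non-decreasing order); B does not mutate the caller's list (A heapifies nums in place) and raises IndexError on exactly the inputs where A does.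
import Mathlib
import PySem

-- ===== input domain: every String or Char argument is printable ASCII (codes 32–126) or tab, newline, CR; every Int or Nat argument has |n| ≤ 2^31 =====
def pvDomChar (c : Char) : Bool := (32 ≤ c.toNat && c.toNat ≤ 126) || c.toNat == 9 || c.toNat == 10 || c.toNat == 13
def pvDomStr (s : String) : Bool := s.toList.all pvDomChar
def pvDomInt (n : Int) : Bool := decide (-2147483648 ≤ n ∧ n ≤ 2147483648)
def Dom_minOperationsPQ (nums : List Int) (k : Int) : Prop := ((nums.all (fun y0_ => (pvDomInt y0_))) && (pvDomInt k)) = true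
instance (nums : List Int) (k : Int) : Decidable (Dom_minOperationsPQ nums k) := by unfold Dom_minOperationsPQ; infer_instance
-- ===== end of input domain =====

-- B replaces A's binary heap with a two-queue merge: sort once, then pop the two
-- globally smallest in O(1) from the sorted originals / the (non-decreasing) queue
-- of combined values.  Equivalence is about the RETURN value only: A heapifies
-- nums in place, B leaves nums untouched.

-- ===== PORT A =====
-- heapq is ported at specification level: a heapified list holds the same multiset,
-- nums[0]/heappop read and remove a minimal element (min?/remove?), heappush adds
-- the element (append).  Only the multiset of values and min-extraction matter for
-- the returned count, so this is exact for the return value.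
def popMinA (l : List Int) : Option (Int × List Int) :=
  match PySem.List.min? l (fun x => x) with
  | none => none
  | some m =>
    match PySem.List.remove? l m with
    | none => none
    | some r => some (m, r)

-- the while-loop; each iteration removes one element, so nums.length + 1 steps of
-- this structural recursion always run it to completion (the 0 case is never the
-- value actually returned)
def minOpsLoopA : Nat → Int → List Int → Int → Int
  | 0, _, _, _ => 0
  | fuel' + 1, k, l, ops =>
    match popMinA l with
    | none => 0            -- nums[0] on an empty heap: IndexError, outside Pre_
    | some (m, l1) =>
      if m < k then
        match popMinA l1 with
        | none => 0        -- second heappop raises: IndexError, outside Pre_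
        | some (m2, l2) =>
          minOpsLoopA fuel' k (l2 ++ [(min m m2) * 2 + max m m2]) (ops + 1)
      else ops

def minOperationsPQ (nums : List Int) (k : Int) : Int :=
  minOpsLoopA (nums.length + 1) k nums 0

-- ===== PORT B =====
-- Source B's _front: peek the smaller front of the two queues (indices i into arr, j into q)
def frontB (arr : List Int) (i : Nat) (q : List Int) (j : Nat) : Option Int :=
  if i < arr.length ∧ (q.length ≤ j ∨ arr.getD i 0 ≤ q.getD j 0) then some (arr.getD i 0)
  else if j < q.length then some (q.getD j 0)
  else none          -- q[j]: IndexError, outside Pre_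

-- Source B's _take: pop the smaller front, advancing its cursor
def takeB (arr : List Int) (i : Nat) (q : List Int) (j : Nat) : Option (Int × Nat × Nat) :=
  if i < arr.length ∧ (q.length ≤ j ∨ arr.getD i 0 ≤ q.getD j 0) then some (arr.getD i 0, i + 1, j)
  else if j < q.length then some (q.getD j 0, i, j + 1)
  else none          -- q[j]: IndexError, outside Pre_

-- Source B's main while-loop over the cursors; each iteration consumes two queue
-- elements and creates one, so arr.length + 1 structural steps always complete it
def minOpsLoopB : Nat → Int → List Int → List Int → Nat → Nat → Int → Int
  | 0, _, _, _, _, _, _ => 0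
  | fuel' + 1, k, arr, q, i, j, ops =>
    match frontB arr i q j with
    | none => 0
    | some f =>
      if f < k then
        match takeB arr i q j with
        | none => 0
        | some (a, i1, j1) =>
          match takeB arr i1 q j1 with
          | none => 0
          | some (b, i2, j2) =>
            minOpsLoopB fuel' k arr (q ++ [2 * a + b]) i2 j2 (ops + 1)
      else ops

def minOperationsPQ_alt (nums : List Int) (k : Int) : Int :=
  minOpsLoopB ((PySem.List.sorted nums (fun x => x) false).length + 1) k
    (PySem.List.sorted nums (fun x => x) false) [] 0 0 0

-- ===== PRECONDITION & SPEC =====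
-- helper for Pre_: insert into a sorted list, and the fully-merged ("Huffman total")
-- value of a sorted list — repeatedly replace the two smallest a ≤ b by 2a+b.
-- This value is invariant under the merge steps both programs perform, which is why
-- it characterises exactly where they raise; it is independent of k and of both ports.
def insSorted (x : Int) : List Int → List Int
  | [] => [x]
  | y :: ys => if x ≤ y then x :: y :: ys else y :: insSorted x ys

-- structural recursion on the (length-bounding) first argument so that the kernel
-- can evaluate it; each merge step shrinks the list by one, so the bound is exact
def huffGoN : Nat → List Int → Int
  | _, [] => 0
  | _, [x] => x
  | 0, _ :: _ :: _ => 0   -- never reached when the bound is the length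
  | n + 1, a :: b :: rest => huffGoN n (insSorted (2 * a + b) rest)

def huffGo (l : List Int) : Int := huffGoN l.length l

def sortAsc (l : List Int) : List Int := l.foldr insSorted []

-- A raises IndexError exactly on the empty list and on inputs whose repeated
-- two-smallest merge bottoms out to a single value still below k; by the merge
-- invariance of the fully-merged value, that is exactly the complement of the
-- condition below.  Pre_ excludes ONLY inputs on which A (and B) raise; it admits
-- every input on which A returns.
def Pre_minOperationsPQ (nums : List Int) (k : Int) : Prop :=
  nums ≠ [] ∧ ((∀ x ∈ nums, k ≤ x) ∨ k ≤ huffGo (sortAsc nums))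
instance (nums : List Int) (k : Int) : Decidable (Pre_minOperationsPQ nums k) := by
  unfold Pre_minOperationsPQ; infer_instance

def pvWitness_minOperationsPQ : List Int × Int := ([1, 2], 3)

def Spec_minOperationsPQ (nums : List Int) (k : Int) (out : Int) : Prop := out = minOperationsPQ_alt nums k
instance (nums : List Int) (k : Int) (out : Int) : Decidable (Spec_minOperationsPQ nums k out) := by unfold Spec_minOperationsPQ; infer_instance

-- ===== CLAIM (what is proved, stated in full; the proofs are below) =====
def Claim_equal_minOperationsPQ : Prop := ∀ (nums : List Int) (k : Int), Dom_minOperationsPQ nums k → Pre_minOperationsPQ nums k → Spec_minOperationsPQ nums k (minOperationsPQ nums k)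

-- ===== LEMMAS AND PROOFS =====

-- list-level view of B's two queues: (remaining originals, remaining combined values)
def frontL : List Int → List Int → Option Int
  | [], [] => none
  | [], c :: _ => some c
  | x :: _, [] => some x
  | x :: _, c :: _ => some (if x ≤ c then x else c)

def takeL : List Int → List Int → Option (Int × List Int × List Int)
  | [], [] => none
  | [], c :: cs => some (c, [], cs)
  | x :: xs, [] => some (x, xs, [])
  | x :: xs, c :: cs => if x ≤ c then some (x, xs, c :: cs) else some (c, x :: xs, cs)

def loopBL : Nat → Int → List Int → List Int → Int → Int
  | 0, _, _, _, _ => 0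
  | fuel' + 1, k, A1, Q, ops =>
    match frontL A1 Q with
    | none => 0
    | some f =>
      if f < k then
        match takeL A1 Q with
        | none => 0
        | some (a, A2, Q2) =>
          match takeL A2 Q2 with
          | none => 0
          | some (b, A3, Q3) => loopBL fuel' k A3 (Q3 ++ [2 * a + b]) (ops + 1)
      else ops

-- B's invariant: every value in the created queue is bounded by 2*min+max of any
-- two (distinct-position) elements of the state that existed when it was created
def GoodQ : List Int → List Int → Prop
  | _, [] => True
  | dom, c :: rest =>
      (∀ a b : Int, [a, b].Subperm dom → c ≤ 2 * min a b + max a b) ∧ GoodQ (dom ++ [c]) rest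

theorem frontL_takeL (A1 Q : List Int) : frontL A1 Q = (takeL A1 Q).map (·.1) := by
  cases A1 <;> cases Q
  · rfl
  · rfl
  · rfl
  · unfold frontL takeL
    dsimp only
    split_ifs <;> rfl

theorem takeL_shape (A1 Q : List Int) (a : Int) (A2 Q2 : List Int)
    (h : takeL A1 Q = some (a, A2, Q2)) :
    (A1 = a :: A2 ∧ Q2 = Q) ∨ (Q = a :: Q2 ∧ A2 = A1) := by
  unfold takeL at h
  cases A1 <;> cases Q
  · cases h
  · simp only [Option.some.injEq, Prod.mk.injEq] at h
    exact Or.inr ⟨by rw [h.1, h.2.2], h.2.1.symm⟩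
  · simp only [Option.some.injEq, Prod.mk.injEq] at h
    exact Or.inl ⟨by rw [h.1, h.2.1], h.2.2.symm⟩
  · dsimp only at h
    split_ifs at h <;> simp only [Option.some.injEq, Prod.mk.injEq] at h
    · exact Or.inl ⟨by rw [h.1, h.2.1], h.2.2.symm⟩
    · exact Or.inr ⟨by rw [h.1, h.2.2], h.2.1.symm⟩

theorem takeL_none (A1 Q : List Int) (h : takeL A1 Q = none) : A1 = [] ∧ Q = [] := by
  cases A1 <;> cases Q
  · exact ⟨rfl, rfl⟩
  · simp [takeL] at h
  · simp [takeL] at h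
  · unfold takeL at h
    dsimp only at h
    split_ifs at h

theorem takeL_isMin (A1 Q : List Int) (a : Int) (A2 Q2 : List Int)
    (hA : A1.Pairwise (· ≤ ·)) (hQ : Q.Pairwise (· ≤ ·))
    (h : takeL A1 Q = some (a, A2, Q2)) : ∀ y ∈ A1 ++ Q, a ≤ y := by
  intro y hy
  cases A1 with
  | nil =>
    cases Q with
    | nil => cases h
    | cons c cs =>
      simp only [takeL, Option.some.injEq, Prod.mk.injEq] at h
      obtain ⟨ha, -, -⟩ := h
      subst ha
      rcases List.mem_append.mp hy with hy' | hy'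
      · cases hy'
      · rcases List.mem_cons.mp hy' with rfl | hy''
        · exact le_refl _
        · exact List.rel_of_pairwise_cons hQ hy''
  | cons x xs =>
    cases Q with
    | nil =>
      simp only [takeL, Option.some.injEq, Prod.mk.injEq] at h
      obtain ⟨ha, -, -⟩ := h
      subst ha
      rcases List.mem_append.mp hy with hy' | hy'
      · rcases List.mem_cons.mp hy' with rfl | hy''
        · exact le_refl _
        · exact List.rel_of_pairwise_cons hA hy''
      · cases hy'
    | cons c cs =>
      simp only [takeL] at h
      split_ifs at h with hxc <;>
        simp only [Option.some.injEq, Prod.mk.injEq] at h <;>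
        obtain ⟨ha, -, -⟩ := h <;> subst ha
      · rcases List.mem_append.mp hy with hy' | hy'
        · rcases List.mem_cons.mp hy' with rfl | hy''
          · exact le_refl _
          · exact List.rel_of_pairwise_cons hA hy''
        · rcases List.mem_cons.mp hy' with rfl | hy''
          · exact hxc
          · exact le_trans hxc (List.rel_of_pairwise_cons hQ hy'')
      · have hcx : c < x := lt_of_not_ge hxc
        rcases List.mem_append.mp hy with hy' | hy'
        · rcases List.mem_cons.mp hy' with rfl | hy''
          · exact le_of_lt hcx
          · exact le_trans (le_of_lt hcx) (List.rel_of_pairwise_cons hA hy'')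
        · rcases List.mem_cons.mp hy' with rfl | hy''
          · exact le_refl _
          · exact List.rel_of_pairwise_cons hQ hy''

theorem takeL_sorted (A1 Q : List Int) (a : Int) (A2 Q2 : List Int)
    (hA : A1.Pairwise (· ≤ ·)) (hQ : Q.Pairwise (· ≤ ·))
    (h : takeL A1 Q = some (a, A2, Q2)) :
    A2.Pairwise (· ≤ ·) ∧ Q2.Pairwise (· ≤ ·) := by
  rcases takeL_shape _ _ _ _ _ h with ⟨e1, e2⟩ | ⟨e1, e2⟩
  · subst e2; rw [e1] at hA; exact ⟨(List.pairwise_cons.mp hA).2, hQ⟩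
  · subst e2; rw [e1] at hQ; exact ⟨hA, (List.pairwise_cons.mp hQ).2⟩

theorem pair_subperm (a b : Int) (L M : List Int) (h : M.Perm (a :: b :: L)) :
    [a, b].Subperm M := by
  have h1 : [a, b].Sublist (a :: b :: L) := by simp
  exact h1.subperm.trans h.symm.subperm

theorem GoodQ_mono (Q dom dom' : List Int) (hsub : dom'.Subperm dom)
    (h : GoodQ dom Q) : GoodQ dom' Q := by
  induction Q generalizing dom dom' with
  | nil => trivial
  | cons c rest ih =>
    obtain ⟨h1, h2⟩ := h
    exact ⟨fun a b hp => h1 a b (hp.trans hsub),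
      ih (dom ++ [c]) (dom' ++ [c]) (hsub.append (List.Subperm.refl _)) h2⟩

theorem GoodQ_le (Q dom : List Int) (a b : Int) (h : GoodQ dom Q)
    (hp : [a, b].Subperm dom) : ∀ c ∈ Q, c ≤ 2 * min a b + max a b := by
  induction Q generalizing dom with
  | nil => intro c hc; cases hc
  | cons c0 rest ih =>
    intro c hc
    obtain ⟨h1, h2⟩ := h
    rcases List.mem_cons.mp hc with hc' | hc'
    · exact hc' ▸ h1 a b hp
    · exact ih (dom ++ [c0]) h2 (hp.trans ((List.sublist_append_left dom [c0]).subperm)) c hc'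

theorem GoodQ_append (Q dom : List Int) (n : Int) (h : GoodQ dom Q)
    (hn : ∀ a b : Int, [a, b].Subperm (dom ++ Q) → n ≤ 2 * min a b + max a b) :
    GoodQ dom (Q ++ [n]) := by
  induction Q generalizing dom with
  | nil => exact ⟨fun a b hp => hn a b (by simpa using hp), trivial⟩
  | cons c rest ih =>
    obtain ⟨h1, h2⟩ := h
    refine ⟨h1, ih (dom ++ [c]) h2 ?_⟩
    intro a b hp
    apply hn a b
    have : (dom ++ [c]) ++ rest = dom ++ (c :: rest) := by simp
    rwa [this] at hp

-- after popping the two global minima a ≤ b, every surviving created value is ≤ 2a+b,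
-- and the invariant still holds with 2a+b appended
theorem step_facts (A1 Q : List Int) (a b : Int) (A2 Q2 A3 Q3 : List Int)
    (hA : A1.Pairwise (· ≤ ·)) (hQ : Q.Pairwise (· ≤ ·)) (hG : GoodQ A1 Q)
    (hab : a ≤ b)
    (h1 : takeL A1 Q = some (a, A2, Q2)) (h2 : takeL A2 Q2 = some (b, A3, Q3)) :
    GoodQ A3 Q3 ∧ (∀ c ∈ Q3, c ≤ 2 * a + b) := by
  have hv : 2 * min a b + max a b = 2 * a + b := by
    rw [min_eq_left hab, max_eq_right hab]
  rcases takeL_shape _ _ _ _ _ h1 with ⟨e1, e2⟩ | ⟨e1, e2⟩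
  · -- first pop from the originals: A1 = a :: A2, Q2 = Q
    subst e2
    rcases takeL_shape _ _ _ _ _ h2 with ⟨f1, f2⟩ | ⟨f1, f2⟩
    · -- second pop also from the originals: A2 = b :: A3, Q3 = Q2
      subst f2
      constructor
      · exact GoodQ_mono Q3 A1 A3 ((by rw [e1, f1]; exact
          (List.sublist_cons_self b A3).trans (List.sublist_cons_self a (b :: A3)) :
            A3.Sublist A1).subperm) hG
      · intro c hc
        have hp : [a, b].Subperm A1 := by
          apply pair_subperm a b A3
          rw [e1, f1]
      -- A1 = a :: b :: A3 exactly
        exact hv ▸ GoodQ_le Q3 A1 a b hG hp c hc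
    · -- second pop from the created queue: Q2 = b :: Q3, A3 = A2
      subst f2
      rw [f1] at hG hQ
      obtain ⟨-, hG2⟩ := hG
      constructor
      · refine GoodQ_mono Q3 (A1 ++ [b]) A3 ?_ hG2
        refine ((?_ : A3.Sublist A1).trans (List.sublist_append_left A1 [b])).subperm
        rw [e1]; exact List.sublist_cons_self a A3
      · intro c hc
        have hp : [a, b].Subperm (A1 ++ [b]) := by
          apply pair_subperm a b A3
          rw [e1]
          simp [(List.perm_append_singleton b A3).cons a]
        exact hv ▸ GoodQ_le Q3 (A1 ++ [b]) a b hG2 hp c hc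
  · -- first pop from the created queue: Q = a :: Q2, A2 = A1
    subst e2
    rw [e1] at hG hQ
    obtain ⟨-, hG2⟩ := hG
    rcases takeL_shape _ _ _ _ _ h2 with ⟨f1, f2⟩ | ⟨f1, f2⟩
    · -- second pop from the originals: A2 = b :: A3, Q3 = Q2
      subst f2
      constructor
      · refine GoodQ_mono Q3 (A2 ++ [a]) A3 ?_ hG2
        refine ((?_ : A3.Sublist A2).trans (List.sublist_append_left A2 [a])).subperm
        rw [f1]; exact List.sublist_cons_self b A3
      · intro c hc
        have hp : [a, b].Subperm (A2 ++ [a]) := by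
          apply pair_subperm a b A3
          rw [f1]
          exact (by simp [(List.perm_append_singleton a A3).cons b] :
              ((b :: A3) ++ [a]).Perm (b :: a :: A3)).trans (List.Perm.swap a b A3)
        exact hv ▸ GoodQ_le Q3 (A2 ++ [a]) a b hG2 hp c hc
    · -- second pop also from the created queue: Q2 = b :: Q3, A3 = A2
      subst f2
      rw [f1] at hG2
      obtain ⟨-, hG3⟩ := hG2
      constructor
      · refine GoodQ_mono Q3 ((A3 ++ [a]) ++ [b]) A3 ?_ hG3
        exact ((List.sublist_append_left A3 [a]).trans
          (List.sublist_append_left (A3 ++ [a]) [b])).subperm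
      · intro c hc
        have hp : [a, b].Subperm ((A3 ++ [a]) ++ [b]) := by
          apply pair_subperm a b A3
          exact ((List.perm_append_singleton b (A3 ++ [a])).trans
            ((List.perm_append_singleton a A3).cons b)).trans (List.Perm.swap a b A3)
        exact hv ▸ GoodQ_le Q3 ((A3 ++ [a]) ++ [b]) a b hG3 hp c hc

theorem popMinA_of_min (l : List Int) (f : Int) (hf : f ∈ l) (hmin : ∀ y ∈ l, f ≤ y) :
    popMinA l = some (f, l.erase f) := by
  obtain ⟨m, hmmin⟩ : ∃ m, PySem.List.min? l (fun x : Int => x) = some m := by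
    cases hm : PySem.List.min? l (fun x : Int => x) with
    | none =>
      have : l = [] := (PySem.List.min?_eq_none_iff l _).mp hm
      subst this; cases hf
    | some m => exact ⟨m, rfl⟩
  have hmf : m = f := by
    have h1 : f ≤ m := hmin m (PySem.List.min?_mem hmmin)
    have h2 : m ≤ f := PySem.List.min?_isMin hmmin f hf
    omega
  subst hmf
  unfold popMinA
  rw [hmmin]
  dsimp only
  rw [PySem.List.remove?_eq_some_erase l m (PySem.List.min?_mem hmmin)]

theorem erase_perm_of_take (l A1 Q : List Int) (a : Int) (A2 Q2 : List Int)
    (hperm : l.Perm (A1 ++ Q)) (h : takeL A1 Q = some (a, A2, Q2)) :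
    (l.erase a).Perm (A2 ++ Q2) := by
  rcases takeL_shape _ _ _ _ _ h with ⟨e1, e2⟩ | ⟨e1, e2⟩
  · subst e2
    rw [e1] at hperm
    have := hperm.erase a
    rw [List.cons_append, List.erase_cons_head] at this
    exact this
  · subst e2
    rw [e1] at hperm
    have hp2 : l.Perm (a :: (A2 ++ Q2)) := hperm.trans List.perm_middle
    have := hp2.erase a
    rwa [List.erase_cons_head] at this

theorem mem_take_state (A1 Q : List Int) (a : Int) (A2 Q2 : List Int)
    (h : takeL A1 Q = some (a, A2, Q2)) : ∀ y ∈ A2 ++ Q2, y ∈ A1 ++ Q := by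
  intro y hy
  rcases takeL_shape _ _ _ _ _ h with ⟨e1, e2⟩ | ⟨e1, e2⟩
  · subst e2; rw [e1]
    rcases List.mem_append.mp hy with hy' | hy'
    · exact List.mem_append.mpr (Or.inl (List.mem_cons_of_mem a hy'))
    · exact List.mem_append.mpr (Or.inr hy')
  · subst e2; rw [e1]
    rcases List.mem_append.mp hy with hy' | hy'
    · exact List.mem_append.mpr (Or.inl hy')
    · exact List.mem_append.mpr (Or.inr (List.mem_cons_of_mem a hy'))

theorem take_mem (A1 Q : List Int) (a : Int) (A2 Q2 : List Int)
    (h : takeL A1 Q = some (a, A2, Q2)) : a ∈ A1 ++ Q := by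
  rcases takeL_shape _ _ _ _ _ h with ⟨e1, e2⟩ | ⟨e1, e2⟩
  · rw [e1]; exact List.mem_append.mpr (Or.inl (List.mem_cons_self))
  · rw [e1]; exact List.mem_append.mpr (Or.inr (List.mem_cons_self))

-- the heart of the proof: A's heap loop = B's two-queue loop, in lockstep on any
-- permutation (both loops step once per unit of fuel, so no length bookkeeping)
theorem loopAL (k : Int) : ∀ (fuel : Nat) (l A1 Q : List Int) (ops : Int),
    l.Perm (A1 ++ Q) → A1.Pairwise (· ≤ ·) → Q.Pairwise (· ≤ ·) →
    GoodQ A1 Q → minOpsLoopA fuel k l ops = loopBL fuel k A1 Q ops := by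
  intro fuel
  induction fuel with
  | zero => intro l A1 Q ops _ _ _ _; rfl
  | succ F ih =>
    intro l A1 Q ops hperm hA hQ hG
    simp only [minOpsLoopA, loopBL]
    cases ht1 : takeL A1 Q with
    | none =>
      obtain ⟨e1, e2⟩ := takeL_none _ _ ht1
      subst e1; subst e2
      have : l = [] := hperm.eq_nil
      subst this
      simp [popMinA, PySem.List.min?, frontL]
    | some r1 =>
      obtain ⟨a, A2, Q2⟩ := r1
      rw [frontL_takeL, ht1]
      simp only [Option.map_some]
      have hamem : a ∈ l := hperm.mem_iff.mpr (take_mem _ _ _ _ _ ht1)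
      have hamin : ∀ y ∈ l, a ≤ y := fun y hy =>
        takeL_isMin _ _ _ _ _ hA hQ ht1 y (hperm.mem_iff.mp hy)
      have hpop1 : popMinA l = some (a, l.erase a) := popMinA_of_min l a hamem hamin
      rw [hpop1]
      dsimp only
      by_cases hk : a < k
      · simp only [hk, if_true]
        have hperm1 : (l.erase a).Perm (A2 ++ Q2) := erase_perm_of_take l A1 Q a A2 Q2 hperm ht1
        obtain ⟨hA2, hQ2⟩ := takeL_sorted _ _ _ _ _ hA hQ ht1
        cases ht2 : takeL A2 Q2 with
        | none =>
          obtain ⟨e1, e2⟩ := takeL_none _ _ ht2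
          subst e1; subst e2
          have : l.erase a = [] := hperm1.eq_nil
          rw [this]
          rfl
        | some r2 =>
          obtain ⟨b, A3, Q3⟩ := r2
          have hbmem : b ∈ l.erase a := hperm1.mem_iff.mpr (take_mem _ _ _ _ _ ht2)
          have hbmin : ∀ y ∈ l.erase a, b ≤ y := fun y hy =>
            takeL_isMin _ _ _ _ _ hA2 hQ2 ht2 y (hperm1.mem_iff.mp hy)
          have hpop2 : popMinA (l.erase a) = some (b, (l.erase a).erase b) :=
            popMinA_of_min _ b hbmem hbmin
          rw [hpop2]
          dsimp only
          have hab : a ≤ b :=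
            hamin b (List.mem_of_mem_erase hbmem)
          have hval : (min a b) * 2 + max a b = 2 * a + b := by
            rw [min_eq_left hab, max_eq_right hab]; ring
          rw [hval]
          obtain ⟨hG3, hle3⟩ := step_facts A1 Q a b A2 Q2 A3 Q3 hA hQ hG hab ht1 ht2
          obtain ⟨hA3, hQ3⟩ := takeL_sorted _ _ _ _ _ hA2 hQ2 ht2
          have hperm2 : ((l.erase a).erase b).Perm (A3 ++ Q3) :=
            erase_perm_of_take _ A2 Q2 b A3 Q3 hperm1 ht2
          refine ih ((l.erase a).erase b ++ [2 * a + b]) A3 (Q3 ++ [2 * a + b]) (ops + 1) ?_ hA3 ?_ ?_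
          · -- permutation of the next states
            refine (hperm2.append_right [2 * a + b]).trans ?_
            rw [List.append_assoc]
          · -- the created queue stays sorted
            rw [List.pairwise_append]
            refine ⟨hQ3, by simp, ?_⟩
            intro c hc d hd
            rw [List.mem_singleton] at hd
            subst hd
            exact hle3 c hc
          · -- and the invariant is re-established
            refine GoodQ_append Q3 A3 (2 * a + b) hG3 ?_
            intro a' b' hp
            have ha' : a' ∈ A3 ++ Q3 := hp.subset (by simp)
            have hb' : b' ∈ A3 ++ Q3 := hp.subset (by simp)
            have h1' : b ≤ a' := hbmin a' (hperm1.mem_iff.mpr (mem_take_state _ _ _ _ _ ht2 a' ha'))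
            have h2' : b ≤ b' := hbmin b' (hperm1.mem_iff.mpr (mem_take_state _ _ _ _ _ ht2 b' hb'))
            rcases le_total a' b' with hcc | hcc
            · rw [min_eq_left hcc, max_eq_right hcc]; omega
            · rw [min_eq_right hcc, max_eq_left hcc]; omega
      · simp [hk]

theorem frontB_takeB (arr : List Int) (i : Nat) (q : List Int) (j : Nat) :
    frontB arr i q j = (takeB arr i q j).map (·.1) := by
  unfold frontB takeB
  split_ifs <;> rfl

-- the cursors (i, j) of the port denote the suffixes arr.drop i / q.drop j
theorem takeB_corr (arr : List Int) (i : Nat) (q : List Int) (j : Nat)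
    (hi : i ≤ arr.length) (hj : j ≤ q.length) :
    (takeB arr i q j = none ∧ takeL (arr.drop i) (q.drop j) = none) ∨
    (∃ a, takeB arr i q j = some (a, i + 1, j) ∧ i < arr.length ∧
        takeL (arr.drop i) (q.drop j) = some (a, arr.drop (i + 1), q.drop j)) ∨
    (∃ a, takeB arr i q j = some (a, i, j + 1) ∧ j < q.length ∧
        takeL (arr.drop i) (q.drop j) = some (a, arr.drop i, q.drop (j + 1))) := by
  by_cases hil : i < arr.length
  · have hda : arr.drop i = arr[i] :: arr.drop (i + 1) := List.drop_eq_getElem_cons hil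
    have hga : arr.getD i 0 = arr[i] := List.getD_eq_getElem arr 0 hil
    by_cases hjl : j < q.length
    · have hdq : q.drop j = q[j] :: q.drop (j + 1) := List.drop_eq_getElem_cons hjl
      have hgq : q.getD j 0 = q[j] := List.getD_eq_getElem q 0 hjl
      by_cases hcmp : arr[i] ≤ q[j]
      · refine Or.inr (Or.inl ⟨arr[i], ?_, hil, ?_⟩)
        · unfold takeB
          rw [if_pos ⟨hil, Or.inr (by rw [hga, hgq]; exact hcmp)⟩, hga]
        · rw [hda, hdq]; unfold takeL; dsimp only; rw [if_pos hcmp]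
      · refine Or.inr (Or.inr ⟨q[j], ?_, hjl, ?_⟩)
        · unfold takeB
          rw [if_neg (by rw [hga, hgq]; intro hcon; rcases hcon.2 with h' | h'; omega; exact hcmp h'), if_pos hjl, hgq]
        · rw [hda, hdq]; unfold takeL; dsimp only; rw [if_neg hcmp]
    · have hje : j = q.length := by omega
      have hdq : q.drop j = [] := by rw [hje, List.drop_length]
      refine Or.inr (Or.inl ⟨arr[i], ?_, hil, ?_⟩)
      · unfold takeB
        rw [if_pos ⟨hil, Or.inl (by omega)⟩, hga]
      · rw [hda, hdq]; rfl
  · have hie : i = arr.length := by omega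
    have hda : arr.drop i = [] := by rw [hie, List.drop_length]
    by_cases hjl : j < q.length
    · have hdq : q.drop j = q[j] :: q.drop (j + 1) := List.drop_eq_getElem_cons hjl
      have hgq : q.getD j 0 = q[j] := List.getD_eq_getElem q 0 hjl
      refine Or.inr (Or.inr ⟨q[j], ?_, hjl, ?_⟩)
      · unfold takeB
        rw [if_neg (fun hcon => absurd hcon.1 hil), if_pos hjl, hgq]
      · rw [hda, hdq]; rfl
    · have hje : j = q.length := by omega
      have hdq : q.drop j = [] := by rw [hje, List.drop_length]
      refine Or.inl ⟨?_, by rw [hda, hdq]; rfl⟩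
      unfold takeB
      rw [if_neg (fun hcon => absurd hcon.1 hil), if_neg hjl]

-- the port of B computes the list-level two-queue loop, again in fuel lockstep
theorem bridgeB (k : Int) : ∀ (fuel : Nat) (arr q : List Int) (i j : Nat) (ops : Int),
    i ≤ arr.length → j ≤ q.length →
    minOpsLoopB fuel k arr q i j ops = loopBL fuel k (arr.drop i) (q.drop j) ops := by
  intro fuel
  induction fuel with
  | zero => intro arr q i j ops _ _; rfl
  | succ F ih =>
    intro arr q i j ops hi hj
    simp only [minOpsLoopB, loopBL]
    rw [frontB_takeB, frontL_takeL]
    rcases takeB_corr arr i q j hi hj with ⟨e1, e2⟩ | ⟨a, e1, hlt, e2⟩ | ⟨a, e1, hlt, e2⟩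
    · rw [e1, e2]; rfl
    · rw [e1, e2]
      simp only [Option.map_some]
      by_cases hk : a < k
      · simp only [hk, if_true]
        rcases takeB_corr arr (i + 1) q j hlt hj with ⟨f1, f2⟩ | ⟨b, f1, hlt2, f2⟩ | ⟨b, f1, hlt2, f2⟩
        · rw [f1, f2]
        · rw [f1, f2]
          dsimp only
          rw [ih arr (q ++ [2 * a + b]) (i + 2) j (ops + 1) (by omega)
              (by simp only [List.length_append, List.length_cons, List.length_nil]; omega),
            List.drop_append_of_le_length hj]
        · rw [f1, f2]
          dsimp only
          rw [ih arr (q ++ [2 * a + b]) (i + 1) (j + 1) (ops + 1) (by omega)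
              (by simp only [List.length_append, List.length_cons, List.length_nil]; omega),
            List.drop_append_of_le_length hlt2]
      · simp [hk]
    · rw [e1, e2]
      simp only [Option.map_some]
      by_cases hk : a < k
      · simp only [hk, if_true]
        rcases takeB_corr arr i q (j + 1) hi hlt with ⟨f1, f2⟩ | ⟨b, f1, hlt2, f2⟩ | ⟨b, f1, hlt2, f2⟩
        · rw [f1, f2]
        · rw [f1, f2]
          dsimp only
          rw [ih arr (q ++ [2 * a + b]) (i + 1) (j + 1) (ops + 1) (by omega)
              (by simp only [List.length_append, List.length_cons, List.length_nil]; omega),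
            List.drop_append_of_le_length hlt]
        · rw [f1, f2]
          dsimp only
          rw [ih arr (q ++ [2 * a + b]) i (j + 2) (ops + 1) hi
              (by simp only [List.length_append, List.length_cons, List.length_nil]; omega),
            List.drop_append_of_le_length hlt2]
      · simp [hk]

-- ===== VERDICT (by name: the statement is the Claim_ definition above) =====
theorem minOperationsPQ_spec : Claim_equal_minOperationsPQ := by
  intro nums k _ _
  unfold Spec_minOperationsPQ minOperationsPQ minOperationsPQ_alt
  rw [bridgeB k _ (PySem.List.sorted nums (fun x => x) false) [] 0 0 0
      (Nat.zero_le _) (Nat.zero_le _)]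
  simp only [List.drop_zero]
  rw [(PySem.List.sorted_perm nums (fun x => x) false).length_eq]
  exact loopAL k (nums.length + 1) nums _ [] 0
    (by rw [List.append_nil]; exact (PySem.List.sorted_perm nums _ false).symm)
    (PySem.List.sorted_pairwise nums _) (by simp) trivial
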